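-- pv_equiv track=rewrite | github.com/7Rocky/AoC-2017 | day_21/main.py | join_subimages
-- ===== SOURCE A (Python) =====
-- import math
--
-- def join_subimages(subimages):
--     image = []
--     width = int(math.sqrt(len(subimages)))
--
--     rows = [''] * len(subimages[0])
--
--     for i, subimage in enumerate(subimages):
--         for j in range(len(rows)):
--             rows[j] += subimage[j]
--
--         if (i + 1) % width == 0:
--             for row in rows:
--                 image.append(row)
--
--             rows = [''] * len(subimages[0])
--
--     return image
-- ===== SOURCE B (Python) =====
-- import math
--
--
-- def join_subimages(subimages):
--     width = int(math.sqrt(len(subimages)))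
--     nr = len(subimages[0])
--     image = []
--     for g in range(len(subimages) // width):
--         block = subimages[g * width:(g + 1) * width]
--         for j in range(nr):
--             image.append(''.join(sub[j] for sub in block))
--     return image
-- ===== Notes on version B (the rewrite author's own statement) =====
-- stated objective: alternative
-- what changed: Replaces A's streaming accumulator with modulo-triggered flushes by explicit chunking: slice the list into groups of width subimages and emit each output row as one join over the group.
import Mathlib
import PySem

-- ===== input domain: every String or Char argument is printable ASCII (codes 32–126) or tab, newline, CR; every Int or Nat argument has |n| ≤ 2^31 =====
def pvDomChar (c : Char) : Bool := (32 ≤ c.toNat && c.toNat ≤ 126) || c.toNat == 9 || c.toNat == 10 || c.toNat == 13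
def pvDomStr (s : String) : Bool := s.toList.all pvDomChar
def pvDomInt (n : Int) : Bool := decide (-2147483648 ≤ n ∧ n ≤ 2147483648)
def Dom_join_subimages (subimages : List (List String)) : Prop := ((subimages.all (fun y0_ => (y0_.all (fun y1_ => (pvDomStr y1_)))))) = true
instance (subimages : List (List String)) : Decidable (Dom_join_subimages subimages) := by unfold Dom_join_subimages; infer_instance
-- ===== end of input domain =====

-- B re-implements A by explicit chunking (slice each group of `width` subimages and join its rows)
-- instead of A's streaming accumulator flushed on a modulo test; same cost, different decomposition.
-- `int(math.sqrt(n))` is ported as `Nat.sqrt n` (exact for every feasible list length).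

-- ===== PORT A =====
-- A's loop body: accumulate each subimage's rows; flush them to the image every `width` subimages.
def pvStepA (nr : Nat) (width : Int) (st : List String × List String) (p : Int × List String) :
    List String × List String :=
  let rows := (List.range st.2.length).foldl
    (fun rs j => rs.set j (rs.getD j "" ++ (PySem.List.pyGet? p.2 (j : Int)).getD "")) st.2
  if PySem.Int.mod (p.1 + 1) width == 0 then
    (rows.foldl (fun im r => im ++ [r]) st.1, List.replicate nr "")
  else
    (st.1, rows)

def join_subimages (subimages : List (List String)) : List String :=
  let width : Int := (Nat.sqrt subimages.length : Int)
  let nr : Nat := ((PySem.List.pyGet? subimages 0).getD []).length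
  ((PySem.List.enumerate subimages 0).foldl (pvStepA nr width)
    ([], List.replicate nr "")).1

-- ===== PORT B =====
def join_subimages_alt (subimages : List (List String)) : List String :=
  let width : Int := (Nat.sqrt subimages.length : Int)
  let nr : Nat := ((PySem.List.pyGet? subimages 0).getD []).length
  (PySem.List.pyRange 0 (PySem.Int.floordiv (subimages.length : Int) width) 1).foldl
    (fun image g =>
      let block := PySem.List.slice subimages (some (g * width)) (some ((g + 1) * width))
      image ++ (List.range nr).map
        (fun (j : Nat) => PySem.Str.join "" (block.map (fun sub => (PySem.List.pyGet? sub (j : Int)).getD ""))))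
    []

-- ===== PRECONDITION & SPEC =====
-- Pre_ excludes exactly the inputs where the Python A raises IndexError: the empty list
-- (subimages[0]) and lists containing a subimage shorter than the first one (subimage[j]).
def Pre_join_subimages (subimages : List (List String)) : Prop :=
  subimages ≠ [] ∧ ∀ s ∈ subimages, (subimages.headD []).length ≤ s.length

instance (subimages : List (List String)) : Decidable (Pre_join_subimages subimages) := by
  unfold Pre_join_subimages; infer_instance

def pvWitness_join_subimages : List (List String) := [["ab", "cd"], ["ef", "gh"]]

def Spec_join_subimages (subimages : List (List String)) (out : List String) : Prop :=
  out = join_subimages_alt subimages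
instance (subimages : List (List String)) (out : List String) : Decidable (Spec_join_subimages subimages out) := by
  unfold Spec_join_subimages; infer_instance

-- ===== CLAIM (what is proved, stated in full; the proofs are below) =====
def Claim_equal_join_subimages : Prop := ∀ (subimages : List (List String)), Dom_join_subimages subimages → Pre_join_subimages subimages → Spec_join_subimages subimages (join_subimages subimages)

-- ===== LEMMAS AND PROOFS =====

-- entry j of a subimage, with the ports' out-of-range default
def pvEntry (sub : List String) (j : Nat) : String := (PySem.List.pyGet? sub (j : Int)).getD ""

-- concatenation of the j-entries of a chunk
def pvJoinRow (c : List (List String)) (j : Nat) : String :=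
  c.foldl (fun acc sub => acc ++ pvEntry sub j) ""

-- the rows A has accumulated for a chunk (mapIdx form)
def pvRowsOf (nr : Nat) (c : List (List String)) : List String :=
  (List.replicate nr "").mapIdx (fun j r => r ++ pvJoinRow c j)

-- the rows B emits for one chunk
def pvGroupRows (nr : Nat) (c : List (List String)) : List String :=
  (List.range nr).map (fun j => PySem.Str.join "" (c.map (fun sub => pvEntry sub j)))

theorem pv_cons_lift (f : Nat → String) (l : List Nat) (x : String) (xs : List String) :
    l.foldl (fun rs j => rs.set (j+1) (rs.getD (j+1) "" ++ f (j+1))) (x :: xs)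
      = x :: l.foldl (fun rs j => rs.set j (rs.getD j "" ++ f (j+1))) xs := by
  induction l generalizing xs with
  | nil => rfl
  | cons a l ih =>
      simp only [List.foldl_cons, List.getD_cons_succ, List.set_cons_succ]
      exact ih _

-- A's inner loop over `range(len(rows))` in closed form
theorem pv_inner_eq (f : Nat → String) (rows : List String) :
    (List.range rows.length).foldl (fun rs j => rs.set j (rs.getD j "" ++ f j)) rows
      = rows.mapIdx (fun j r => r ++ f j) := by
  induction rows generalizing f with
  | nil => rfl
  | cons r rs ih =>
      rw [List.length_cons, List.range_succ_eq_map]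
      simp only [List.foldl_cons, List.foldl_map, List.getD_cons_zero, List.set_cons_zero]
      rw [pv_cons_lift f, ih (fun j => f (j+1)), List.mapIdx_cons]

theorem pv_mapIdx_comp {α β γ : Type} (l : List α) (f : Nat → α → β) (g : Nat → β → γ) :
    (l.mapIdx f).mapIdx g = l.mapIdx (fun i a => g i (f i a)) := by
  induction l generalizing f g with
  | nil => rfl
  | cons x xs ih => simp only [List.mapIdx_cons, ih]

theorem pv_str_foldl_shift (c : List (List String)) (j : Nat) (a b : String) :
    c.foldl (fun acc sub => acc ++ pvEntry sub j) (a ++ b)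
      = a ++ c.foldl (fun acc sub => acc ++ pvEntry sub j) b := by
  induction c generalizing b with
  | nil => rfl
  | cons x xs ih => simp only [List.foldl_cons, String.append_assoc, ih]

theorem pv_joinRow_cons (x : List String) (c : List (List String)) (j : Nat) :
    pvJoinRow (x :: c) j = pvEntry x j ++ pvJoinRow c j := by
  unfold pvJoinRow
  simp only [List.foldl_cons]
  have h : ("" : String) ++ pvEntry x j = pvEntry x j ++ "" := by
    simp [String.empty_append, String.append_empty]
  rw [h, pv_str_foldl_shift]

theorem pv_mapIdx_id (rows : List String) :
    List.mapIdx (fun (_ : Nat) (r : String) => r) rows = rows := by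
  induction rows with
  | nil => rfl
  | cons y ys ihy => simp [List.mapIdx_cons, ihy]

-- accumulating a whole chunk over the rows, in closed form
theorem pv_acc_eq (c : List (List String)) (rows : List String) :
    c.foldl (fun rows sub => rows.mapIdx (fun j r => r ++ pvEntry sub j)) rows
      = rows.mapIdx (fun j r => r ++ pvJoinRow c j) := by
  induction c generalizing rows with
  | nil => simp [pvJoinRow, pv_mapIdx_id]
  | cons x xs ih =>
      simp only [List.foldl_cons, ih, pv_mapIdx_comp, pv_joinRow_cons, String.append_assoc]

theorem pv_chars_join_nil (l : List (List Char)) : PySem.Chars.join [] l = l.flatten := by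
  induction l with
  | nil => simp [PySem.Chars.join_nil]
  | cons x xs ih =>
      cases xs with
      | nil => simp [PySem.Chars.join_singleton]
      | cons y ys => simp only [PySem.Chars.join_cons_cons] at *; simp [ih]

-- ''.join(parts) is plain left-to-right concatenation
theorem pv_join_empty_eq_foldl (parts : List String) :
    PySem.Str.join "" parts = parts.foldl (fun a s => a ++ s) "" := by
  have h : ∀ (acc : String) (parts : List String),
      (parts.foldl (fun a s => a ++ s) acc).toList = acc.toList ++ (parts.map String.toList).flatten := by
    intro acc parts
    induction parts generalizing acc with
    | nil => simp
    | cons x xs ih => simp [ih, List.append_assoc]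
  apply String.toList_injective
  rw [PySem.Str.toList_join]
  have he : ("" : String).toList = [] := rfl
  rw [he, pv_chars_join_nil, h]
  simp

theorem pv_mapIdx_replicate (nr : Nat) (f : Nat → String → String) (a : String) :
    (List.replicate nr a).mapIdx f = (List.range nr).map (fun j => f j a) := by
  induction nr generalizing f with
  | zero => rfl
  | succ n ih =>
      rw [List.replicate_succ, List.mapIdx_cons, List.range_succ_eq_map, List.map_cons, List.map_map]
      rw [ih]
      simp [Function.comp_def]

theorem pv_rowsOf_eq_groupRows (nr : Nat) (c : List (List String)) :
    pvRowsOf nr c = pvGroupRows nr c := by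
  unfold pvRowsOf pvGroupRows
  rw [pv_mapIdx_replicate]
  congr 1
  funext j
  rw [String.empty_append, pv_join_empty_eq_foldl, List.foldl_map]
  rfl

-- folding a chunk none of whose flush tests fire just accumulates the rows
theorem pv_noflush (nr : Nat) (w : Nat) (c : List (List String)) (i0 : Int)
    (img rows : List String)
    (h : ∀ k : Nat, k < c.length → ¬ ((w : Int) ∣ (i0 + k + 1))) :
    (PySem.List.enumerate c i0).foldl (pvStepA nr w) (img, rows)
      = (img, c.foldl (fun rows sub => rows.mapIdx (fun j r => r ++ pvEntry sub j)) rows) := by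
  induction c generalizing i0 rows with
  | nil => rfl
  | cons x xs ih =>
      rw [PySem.List.enumerate_cons, List.foldl_cons]
      have h0 : ¬ ((w : Int) ∣ (i0 + 1)) := by
        have := h 0 (by simp)
        simpa using this
      have hstep : pvStepA nr w (img, rows) (i0, x)
          = (img, rows.mapIdx (fun j r => r ++ pvEntry x j)) := by
        unfold pvStepA
        have : (PySem.Int.mod (i0 + 1) w == 0) = false := by
          simp [PySem.Int.mod_eq_zero_iff_dvd, h0]
        simp only [this, Bool.false_eq_true, if_false]
        have hpe : ∀ j : Nat, (PySem.List.pyGet? x (j : Int)).getD "" = pvEntry x j := fun _ => rfl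
        simp only [hpe]
        rw [pv_inner_eq (pvEntry x) rows]
      rw [hstep, List.foldl_cons]
      rw [ih (i0 + 1) _ (fun k hk => by
        have := h (k + 1) (by simpa using Nat.succ_lt_succ hk)
        push_cast at this ⊢
        convert this using 2
        ring)]

-- folding one aligned chunk of exactly `w` subimages flushes its rows at the end
theorem pv_flush (nr w : Nat) (hw : 0 < w) (c : List (List String)) (hc : c.length = w)
    (i0 : Int) (hi : (w : Int) ∣ i0) (img : List String) :
    (PySem.List.enumerate c i0).foldl (pvStepA nr w) (img, List.replicate nr "")
      = (img ++ (List.replicate nr "").mapIdx (fun j r => r ++ pvJoinRow c j),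
         List.replicate nr "") := by
  rcases List.eq_nil_or_concat c with rfl | ⟨l, x, rfl⟩
  · simp at hc; omega
  · simp only [List.concat_eq_append] at hc ⊢
    have hl : l.length = w - 1 := by
      have := hc; simp [List.length_append] at this; omega
    rw [PySem.List.enumerate_append, List.foldl_append]
    rw [pv_noflush nr w l i0 img (List.replicate nr "") (fun k hk hdvd => by
      have hk1 : (w : Int) ∣ ((k : Int) + 1) := by
        have := Int.dvd_sub hdvd hi
        convert this using 1; ring
      have hk2 : w ∣ (k + 1) := by exact_mod_cast hk1
      have := Nat.le_of_dvd (Nat.succ_pos k) hk2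
      omega)]
    have henum : PySem.List.enumerate [x] (i0 + (l.length : Int)) = [((i0 + (l.length : Int)), x)] := by
      simp [PySem.List.enumerate]
    rw [henum, List.foldl_cons, List.foldl_nil]
    set R := l.foldl (fun rows sub => List.mapIdx (fun j r => r ++ pvEntry sub j) rows) (List.replicate nr "") with hR
    unfold pvStepA
    have hmod : (PySem.Int.mod (i0 + (l.length : Int) + 1) (w : Int) == 0) = true := by
      simp only [beq_iff_eq, PySem.Int.mod_eq_zero_iff_dvd]
      have : i0 + (l.length : Int) + 1 = i0 + (w : Int) := by
        rw [hl]; push_cast [Nat.cast_sub (by omega : 1 ≤ w)]; ring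
      rw [this]
      exact Int.dvd_add hi dvd_rfl
    simp only [hmod, if_true]
    have hpe : ∀ j : Nat, (PySem.List.pyGet? x (j : Int)).getD "" = pvEntry x j := fun _ => rfl
    simp only [hpe]
    rw [pv_inner_eq (pvEntry x) R]
    rw [PySem.List.foldl_append_singleton_eq_self]
    congr 1
    have hacc := pv_acc_eq (l ++ [x]) (List.replicate nr "")
    rw [List.foldl_append, List.foldl_cons, List.foldl_nil] at hacc
    rw [hR]
    rw [hacc]

-- A's whole loop, characterised as B's chunk traversal
theorem pv_main (nr w : Nat) (hw : 0 < w) (n : Nat) :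
    ∀ (l : List (List String)), l.length = n → ∀ (i0 : Int) (img : List String), (w : Int) ∣ i0 →
    ((PySem.List.enumerate l i0).foldl (pvStepA nr w) (img, List.replicate nr "")).1
      = img ++ (List.range (l.length / w)).flatMap
          (fun gi => pvRowsOf nr ((l.drop (gi * w)).take w)) := by
  induction n using Nat.strong_induction_on with
  | _ n ih =>
    intro l hn i0 img hi
    by_cases hlt : l.length < w
    · rw [Nat.div_eq_of_lt hlt]
      rw [pv_noflush nr w l i0 img (List.replicate nr "") (fun k hk hdvd => by
        have hk1 : (w : Int) ∣ ((k : Int) + 1) := by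
          have := Int.dvd_sub hdvd hi
          convert this using 1; ring
        have hk2 : w ∣ (k + 1) := by exact_mod_cast hk1
        have := Nat.le_of_dvd (Nat.succ_pos k) hk2
        omega)]
      simp
    · push_neg at hlt
      have hsplit : l = l.take w ++ l.drop w := (List.take_append_drop w l).symm
      have hclen : (l.take w).length = w := by simp [List.length_take]; omega
      rw [hsplit, PySem.List.enumerate_append, List.foldl_append]
      rw [pv_flush nr w hw (l.take w) hclen i0 hi img]
      have hrest : (l.drop w).length = n - w := by simp [hn]
      have hlt2 : n - w < n := by omega
      rw [show List.mapIdx (fun j r => r ++ pvJoinRow (l.take w) j) (List.replicate nr "") = pvRowsOf nr (l.take w) from rfl]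
      rw [ih (n - w) hlt2 (l.drop w) hrest (i0 + (l.take w).length)
            (img ++ pvRowsOf nr (l.take w)) (by rw [hclen]; exact Int.dvd_add hi dvd_rfl)]
      rw [List.append_assoc, ← hsplit]
      congr 1
      have hdiv : l.length / w = (l.drop w).length / w + 1 := by
        have h1 : l.length = (l.drop w).length + w := by simp; omega
        rw [h1, Nat.add_div_right _ hw]
      rw [hdiv, List.range_succ_eq_map, List.flatMap_cons, List.flatMap_map]
      congr 1
      · rw [Nat.zero_mul, List.drop_zero]
      · congr 1
        funext gi
        simp only [List.drop_drop, Nat.succ_mul]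
        rw [Nat.add_comm w (gi * w)]

-- B's port, characterised the same way
theorem pv_B_eq (s : List (List String)) :
    join_subimages_alt s
      = (List.range (s.length / Nat.sqrt s.length)).flatMap
          (fun gi => pvGroupRows ((PySem.List.pyGet? s 0).getD []).length
            ((s.drop (gi * Nat.sqrt s.length)).take (Nat.sqrt s.length))) := by
  rw [show join_subimages_alt s
        = (PySem.List.pyRange 0 (PySem.Int.floordiv (s.length : Int) (Nat.sqrt s.length : Int)) 1).foldl
            (fun image g =>
              image ++ (List.range ((PySem.List.pyGet? s 0).getD []).length).map
                (fun (j : Nat) => PySem.Str.join ""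
                  ((PySem.List.slice s (some (g * (Nat.sqrt s.length : Int)))
                      (some ((g + 1) * (Nat.sqrt s.length : Int)))).map
                    (fun sub => (PySem.List.pyGet? sub (j : Int)).getD ""))))
            [] from rfl]
  rw [PySem.Int.floordiv_natCast, PySem.List.pyRange_zero_natCast, List.foldl_map,
      PySem.List.foldl_append_eq_flatMap, List.nil_append]
  congr 1
  funext gi
  have h1 : ((gi : Int) * (Nat.sqrt s.length : Int)) = ((gi * Nat.sqrt s.length : Nat) : Int) := by
    push_cast; ring
  have h2 : (((gi : Int) + 1) * (Nat.sqrt s.length : Int)) = ((gi * Nat.sqrt s.length + Nat.sqrt s.length : Nat) : Int) := by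
    push_cast; ring
  rw [h1, h2, PySem.List.slice_natCast, Nat.add_sub_cancel_left]
  rfl

-- ===== VERDICT (by name: the statement is the Claim_ definition above) =====
theorem join_subimages_spec : Claim_equal_join_subimages := by
  intro s _hdom hpre
  unfold Spec_join_subimages
  obtain ⟨hne, _⟩ := hpre
  have hw : 0 < Nat.sqrt s.length := Nat.sqrt_pos.mpr (List.length_pos_iff.mpr hne)
  have hA : join_subimages s
      = ((PySem.List.enumerate s 0).foldl
          (pvStepA ((PySem.List.pyGet? s 0).getD []).length (Nat.sqrt s.length : Int))
          ([], List.replicate ((PySem.List.pyGet? s 0).getD []).length "")).1 := rfl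
  rw [hA, pv_main _ _ hw s.length s rfl 0 [] (dvd_zero _), List.nil_append, pv_B_eq]
  congr 1
  funext gi
  rw [pv_rowsOf_eq_groupRows]
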